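-- pv_equiv track=rewrite | github.com/dinleo/CodeTest | PyCode/Programmers_Test/Level/level_3/조합_불량이용자.py | solution
-- ===== SOURCE A (Python) =====
-- from itertools import product
--
-- def solution(user_id, banned_id):
--     d = []
--     ld = len(banned_id)
--     for i in range(len(banned_id)):
--         b = banned_id[i]
--         d.append([])
--         for u in user_id:
--             catch = True
--             if len(b) != len(u):
--                 continue
--             ln = len(b)
--             for j in range(ln):
--                 if b[j] != "*":
--                     if b[j] != u[j]:
--                         catch = False
--                         break
--             if catch:
--                 d[i].append(u)
--     pro = list(product(*d))
--     set_pro = []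
--     for p in pro:
--         s = set(p)
--         if (len(s) == ld) and (s not in set_pro):
--             set_pro.append(s)
--
--     return len(set_pro)
-- ===== SOURCE B (Python) =====
-- def solution(user_id, banned_id):
--     def matches(b, u):
--         return len(b) == len(u) and all(bc == "*" or bc == uc for bc, uc in zip(b, u))
--
--     cand = [[u for u in user_id if matches(b, u)] for b in banned_id]
--     found = []
--
--     def dfs(i, chosen):
--         if i == len(cand):
--             s = set(chosen)
--             if s not in found:
--                 found.append(s)
--             return
--         for u in cand[i]:
--             if u not in chosen:
--                 chosen.append(u)
--                 dfs(i + 1, chosen)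
--                 chosen.pop()
--
--     dfs(0, [])
--     return len(found)
-- ===== Notes on version B (the rewrite author's own statement) =====
-- stated objective: alternative
-- what changed: Replaces building the full itertools.product of candidate lists and filtering tuples afterwards by a recursive DFS over the pattern index that skips already-chosen users during the search, collecting distinct user-sets as it goes.
import Mathlib
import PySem

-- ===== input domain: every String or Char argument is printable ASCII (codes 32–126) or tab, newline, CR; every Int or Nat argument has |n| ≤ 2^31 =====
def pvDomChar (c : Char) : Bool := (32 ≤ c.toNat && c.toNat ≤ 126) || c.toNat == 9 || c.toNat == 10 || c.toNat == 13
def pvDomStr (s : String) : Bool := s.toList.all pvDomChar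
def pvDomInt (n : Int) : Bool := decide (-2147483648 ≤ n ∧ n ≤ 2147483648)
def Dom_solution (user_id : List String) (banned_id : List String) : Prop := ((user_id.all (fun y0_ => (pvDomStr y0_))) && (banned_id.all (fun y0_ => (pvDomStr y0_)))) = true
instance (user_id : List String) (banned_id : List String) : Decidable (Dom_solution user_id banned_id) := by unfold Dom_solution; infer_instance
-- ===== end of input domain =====

-- B replaces A's full itertools.product + post-filter by a DFS over the pattern index
-- that skips already-chosen users during the search (alternative algorithm, same results).

-- ===== PORT A =====
-- inner 'for j in range(ln)' loop of A, with its early break (exact: same chars, same branch order)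
def pvScanA : List Char → List Char → Bool
  | bj :: bs, uj :: us =>
      if bj ≠ '*' then (if bj ≠ uj then false else pvScanA bs us) else pvScanA bs us
  | _, _ => true

-- 'for u in user_id' body building row d[i]
def pvRowA (user_id : List String) (b : String) : List String :=
  user_id.foldl (fun row u =>
    if PySem.Str.len b ≠ PySem.Str.len u then row
    else if pvScanA b.toList u.toList then row ++ [u] else row) []

-- itertools.product(*d): first list varies slowest
def pvProduct {α : Type} : List (List α) → List (List α)
  | [] => [[]]
  | xs :: rest => xs.flatMap (fun x => (pvProduct rest).map (fun p => x :: p))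

def solution (user_id : List String) (banned_id : List String) : Int :=
  let ld : Int := PySem.List.len banned_id
  let d : List (List String) :=
    (PySem.List.pyRange 0 (PySem.List.len banned_id) 1).foldl
      (fun d i => d ++ [pvRowA user_id (PySem.List.pyGetD banned_id i "")]) []
  let pro := pvProduct d
  let set_pro : List (PySem.Set String) :=
    pro.foldl (fun acc p =>
      let s := PySem.Set.ofList p
      if PySem.Set.len s == ld && !(acc.any (fun t => PySem.Set.equal s t))
      then acc ++ [s] else acc) []
  PySem.List.len set_pro

-- ===== PORT B =====
def pvMatches (b u : String) : Bool :=
  PySem.Str.len b == PySem.Str.len u &&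
    (b.toList.zip u.toList).all (fun p => p.1 == '*' || p.1 == p.2)

def pvDfs : List (List String) → List String → List (PySem.Set String) → List (PySem.Set String)
  | [], chosen, found =>
      let s := PySem.Set.ofList chosen
      if found.any (fun t => PySem.Set.equal s t) then found else found ++ [s]
  | c :: rest, chosen, found =>
      c.foldl (fun fnd u => if u ∈ chosen then fnd else pvDfs rest (chosen ++ [u]) fnd) found

def solution_alt (user_id : List String) (banned_id : List String) : Int :=
  let cand := banned_id.map (fun b => user_id.filter (fun u => pvMatches b u))
  PySem.List.len (pvDfs cand [] [])

-- ===== PRECONDITION & SPEC =====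
def Spec_solution (user_id : List String) (banned_id : List String) (out : Int) : Prop := out = solution_alt user_id banned_id
instance (user_id : List String) (banned_id : List String) (out : Int) : Decidable (Spec_solution user_id banned_id out) := by unfold Spec_solution; infer_instance

-- ===== CLAIM (what is proved, stated in full; the proofs are below) =====
def Claim_equal_solution : Prop := ∀ (user_id : List String) (banned_id : List String), Dom_solution user_id banned_id → Spec_solution user_id banned_id (solution user_id banned_id)

-- ===== LEMMAS AND PROOFS =====

-- A's set_pro fold body, named for the proofs
def pvStepA (ld : Int) (acc : List (PySem.Set String)) (p : List String) : List (PySem.Set String) :=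
  let s := PySem.Set.ofList p
  if PySem.Set.len s == ld && !(acc.any (fun t => PySem.Set.equal s t))
  then acc ++ [s] else acc

theorem pvScanA_eq_zip_all (b u : List Char) :
    pvScanA b u = (b.zip u).all (fun p => p.1 == '*' || p.1 == p.2) := by
  induction b generalizing u with
  | nil => cases u <;> simp [pvScanA]
  | cons bj bs ih =>
    cases u with
    | nil => simp [pvScanA]
    | cons uj us =>
      by_cases h : bj = '*'
      · simp [pvScanA, h, ih]
      · by_cases h2 : bj = uj <;> simp [pvScanA, h, h2, ih]

theorem pv_foldl_filter {α : Type} (p : α → Bool) (l acc : List α) :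
    l.foldl (fun a x => if p x then a ++ [x] else a) acc = acc ++ l.filter p := by
  induction l generalizing acc with
  | nil => simp
  | cons x l ih =>
    by_cases h : p x <;> simp [h, ih]

theorem pvRowA_eq_filter (user_id : List String) (b : String) :
    pvRowA user_id b = user_id.filter (fun u => pvMatches b u) := by
  unfold pvRowA
  have hbody : (fun (row : List String) (u : String) =>
      if PySem.Str.len b ≠ PySem.Str.len u then row
      else if pvScanA b.toList u.toList then row ++ [u] else row)
      = (fun row u => if pvMatches b u then row ++ [u] else row) := by
    funext row u
    by_cases h : PySem.Str.len b = PySem.Str.len u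
    · by_cases h2 : pvScanA b.toList u.toList = true <;>
        simp_all [pvMatches, ← pvScanA_eq_zip_all]
    · simp_all [pvMatches, ← pvScanA_eq_zip_all]
  rw [hbody]
  simpa using pv_foldl_filter (fun u => pvMatches b u) user_id []

theorem pv_foldl_append_singleton {α β : Type} (f : α → β) (l : List α) (acc : List β) :
    l.foldl (fun a x => a ++ [f x]) acc = acc ++ l.map f := by
  induction l generalizing acc with
  | nil => simp
  | cons x l ih => simp [ih]

theorem pv_length_mem_product {α : Type} (ds : List (List α)) (p : List α)
    (h : p ∈ pvProduct ds) : p.length = ds.length := by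
  induction ds generalizing p with
  | nil => simp [pvProduct] at h; simp [h]
  | cons c rest ih =>
    simp [pvProduct] at h
    obtain ⟨x, _, q, hq, rfl⟩ := h
    simp [ih q hq]

theorem pv_ofList_length_iff (l : List String) :
    (PySem.Set.ofList l).length = l.length ↔ l.Nodup := by
  induction l using List.reverseRecOn with
  | nil => simp
  | append_singleton xs x ih =>
    rw [PySem.Set.ofList_append_singleton, List.nodup_append]
    have hle := PySem.Set.length_ofList_le xs
    by_cases h : x ∈ PySem.Set.ofList xs
    · have hx : x ∈ xs := (PySem.Set.mem_ofList xs x).1 h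
      rw [PySem.Set.add_of_mem h]
      simp only [List.length_append, List.length_cons, List.length_nil]
      constructor
      · intro he; omega
      · rintro ⟨-, -, hd⟩; exact (hd x hx x (by simp) rfl).elim
    · have hx : x ∉ xs := fun hc => h ((PySem.Set.mem_ofList xs x).2 hc)
      rw [PySem.Set.add_of_not_mem h]
      simp only [List.length_append, List.length_cons, List.length_nil]
      constructor
      · intro he
        refine ⟨ih.1 (by omega), by simp, ?_⟩
        intro a ha b hb
        simp only [List.mem_singleton] at hb
        subst hb
        exact fun he => hx (he ▸ ha)
      · rintro ⟨hn, -, -⟩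
        have := ih.2 hn; omega

theorem pv_foldl_flatMap {α β γ : Type} (g : γ → β → γ) (h : α → List β)
    (l : List α) (init : γ) :
    (l.flatMap h).foldl g init = l.foldl (fun acc x => (h x).foldl g acc) init := by
  induction l generalizing init with
  | nil => simp
  | cons x l ih => simp [List.foldl_append, ih]

theorem pv_foldl_congr_mem {α β : Type} {f g : β → α → β} (l : List α) (init : β)
    (h : ∀ acc x, x ∈ l → f acc x = g acc x) : l.foldl f init = l.foldl g init := by
  induction l generalizing init with
  | nil => rfl
  | cons x l ih =>
    simp only [List.foldl_cons]
    rw [h init x (by simp)]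
    exact ih _ (fun acc y hy => h acc y (by simp [hy]))

theorem pv_foldl_id {α β : Type} (l : List α) (init : β) :
    l.foldl (fun acc _ => acc) init = init := by
  induction l <;> simp_all

theorem pvDfs_eq_foldl (cand : List (List String)) (pre : List String)
    (found : List (PySem.Set String)) (hnd : pre.Nodup) :
    pvDfs cand pre found =
      (pvProduct cand).foldl
        (fun acc p => pvStepA ((pre.length + cand.length : Nat) : Int) acc (pre ++ p)) found := by
  induction cand generalizing pre found with
  | nil =>
    have he := PySem.Set.ofList_eq_self_of_nodup _ hnd
    by_cases h : found.any (fun t => PySem.Set.equal pre t) <;>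
      simp [pvProduct, pvDfs, pvStepA, he, h, PySem.Set.len]
  | cons c rest ih =>
    simp only [pvDfs, pvProduct]
    rw [pv_foldl_flatMap]
    apply pv_foldl_congr_mem
    intro fnd x _
    by_cases hx : x ∈ pre
    · simp only [hx, if_true]
      rw [List.foldl_map]
      rw [pv_foldl_congr_mem ((pvProduct rest)) fnd
        (g := fun acc _ => acc) ?_, pv_foldl_id]
      intro acc q hq
      have hlq : q.length = rest.length := pv_length_mem_product rest q hq
      have hnodup : ¬ (pre ++ x :: q).Nodup := by
        intro hn
        rcases List.nodup_append.1 hn with ⟨-, -, hd⟩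
        exact hd x hx x (by simp) rfl
      have hlen : (PySem.Set.ofList (pre ++ x :: q)).length ≠ pre.length + (c :: rest).length := by
        intro he
        apply hnodup
        apply (pv_ofList_length_iff _).1
        rw [he]; simp [hlq]
      simp only [pvStepA]
      simp
      intro hc
      exfalso
      apply hlen
      have hnat : (PySem.Set.ofList (pre ++ x :: q)).length = pre.length + (rest.length + 1) := by
        exact_mod_cast hc
      simpa using hnat
    · simp only [hx, if_false]
      have hnd' : (pre ++ [x]).Nodup := by
        rw [List.nodup_append]
        refine ⟨hnd, List.nodup_singleton x, ?_⟩
        intro a ha b hb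
        simp only [List.mem_singleton] at hb
        subst hb
        exact fun he => hx (he ▸ ha)
      rw [ih (pre ++ [x]) fnd hnd']
      rw [List.foldl_map]
      apply pv_foldl_congr_mem
      intro acc q _
      have h1 : pre ++ [x] ++ q = pre ++ x :: q := by simp
      have h2 : (((pre ++ [x]).length + rest.length : Nat) : Int)
          = ((pre.length + (c :: rest).length : Nat) : Int) := by
        simp; ring
      rw [h1, h2]

theorem pvDfs_top (cand : List (List String)) :
    pvDfs cand [] [] = (pvProduct cand).foldl
      (fun acc p => pvStepA (cand.length : Int) acc p) [] := by
  rw [pvDfs_eq_foldl cand [] [] List.nodup_nil]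
  apply pv_foldl_congr_mem
  intro acc p _
  rw [List.nil_append]
  congr 1
  simp

-- ===== VERDICT (by name: the statement is the Claim_ definition above) =====
theorem solution_spec : Claim_equal_solution := by
  intro user_id banned_id _
  unfold Spec_solution
  simp only [solution, solution_alt]
  have hd1 : (PySem.List.pyRange 0 (PySem.List.len banned_id) 1).foldl
      (fun d i => d ++ [pvRowA user_id (PySem.List.pyGetD banned_id i "")]) []
      = banned_id.foldl (fun d b => d ++ [pvRowA user_id b]) [] :=
    PySem.List.foldl_pyRange_zero_pyGetD banned_id "" (fun d b => d ++ [pvRowA user_id b]) []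
  rw [hd1, pv_foldl_append_singleton (pvRowA user_id) banned_id []]
  have hmap : banned_id.map (pvRowA user_id)
      = banned_id.map (fun b => user_id.filter (fun u => pvMatches b u)) := by
    simp [pvRowA_eq_filter]
  rw [List.nil_append, hmap, pvDfs_top]
  have hc : (((banned_id.map (fun b => user_id.filter (fun u => pvMatches b u))).length : Nat) : Int)
      = PySem.List.len banned_id := by
    simp [PySem.List.len]
  simp only [hc]
  rfl
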